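-- pv_equiv track=rewrite | github.com/raphael-group/RAIG | src/raig_pipeline.py | findCloseGenes
-- ===== SOURCE A (Python) =====
-- def findCloseGenes(metagenebkt, left, right):
-- 	minleft = 10**10
-- 	minright = 10**10
-- 	leftg = ""
-- 	rightg= ""
-- 	for g in metagenebkt:
-- 		if metagenebkt[g][1] < left and left - metagenebkt[g][1] < minleft:
-- 			leftg = g
-- 			minleft = left - metagenebkt[g][1]
--
-- 		if metagenebkt[g][0] > right and metagenebkt[g][0] - right < minright:
-- 			rightg = g
-- 			minright = metagenebkt[g][0] - right
--
-- 	#if minright < minleft: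
-- 	#	return {"["+rightg+"]":set()}
-- 	#else:
-- 	#	return {"["+leftg+"]":set()}
-- 	return set(["["+leftg+","+rightg+"]"])
-- ===== SOURCE B (Python) =====
-- def findCloseGenes(metagenebkt, left, right):
--     lcand = [g for g in metagenebkt if metagenebkt[g][1] < left]
--     rcand = [g for g in metagenebkt if metagenebkt[g][0] > right]
--     leftg = min(lcand, key=lambda g: left - metagenebkt[g][1]) if lcand else ""
--     rightg = min(rcand, key=lambda g: metagenebkt[g][0] - right) if rcand else ""
--     return {"[" + leftg + "," + rightg + "]"}
-- ===== Notes on version B (the rewrite author's own statement) =====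
-- stated objective: simpler
-- what changed: Replaces A's single interleaved running-minimum loop over four mutable state variables with two declarative passes: filter the candidates flanking each side, then take each argmin with min(key=...) (first occurrence on ties, '' when empty).
import Mathlib
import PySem

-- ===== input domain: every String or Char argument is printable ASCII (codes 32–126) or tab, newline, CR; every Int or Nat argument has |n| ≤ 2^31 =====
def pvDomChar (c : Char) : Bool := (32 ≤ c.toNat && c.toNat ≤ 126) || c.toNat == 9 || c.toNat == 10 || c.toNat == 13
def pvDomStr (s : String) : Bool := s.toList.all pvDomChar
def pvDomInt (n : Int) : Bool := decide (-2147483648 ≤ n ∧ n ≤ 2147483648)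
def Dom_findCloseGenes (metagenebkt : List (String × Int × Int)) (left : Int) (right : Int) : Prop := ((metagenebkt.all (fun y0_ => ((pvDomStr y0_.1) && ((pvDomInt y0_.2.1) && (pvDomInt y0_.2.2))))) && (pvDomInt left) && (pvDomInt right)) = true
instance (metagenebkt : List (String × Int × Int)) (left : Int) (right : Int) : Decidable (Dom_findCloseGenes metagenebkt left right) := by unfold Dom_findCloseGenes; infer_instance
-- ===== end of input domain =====

-- B replaces A's single interleaved running-minimum loop by two declarative filter+argmin passes (objective: simpler).


-- shared dict primitive: metagenebkt[g], first-match lookup in the association list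
-- (both Pythons only look up keys taken from the dict itself, so the default is never reached)
def pvLookup (m : List (String × Int × Int)) (g : String) : Int × Int :=
  ((m.find? (fun p => p.1 == g)).map (fun p => p.2)).getD (0, 0)

-- ===== PORT A =====
def findCloseGenes (metagenebkt : List (String × Int × Int)) (left : Int) (right : Int) : List String :=
  -- state (minleft, minright, leftg, rightg); for g in metagenebkt iterates the keys
  let st : Int × Int × String × String :=
    (metagenebkt.map (fun p => p.1)).foldl (fun s g =>
      let v := pvLookup metagenebkt g
      let s1 := if v.2 < left ∧ left - v.2 < s.1 then (left - v.2, s.2.1, g, s.2.2.2) else s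
      if v.1 > right ∧ v.1 - right < s1.2.1 then (s1.1, v.1 - right, s1.2.2.1, g) else s1)
      (10 ^ 10, 10 ^ 10, "", "")
  ["[" ++ st.2.2.1 ++ "," ++ st.2.2.2 ++ "]"]

-- ===== PORT B =====
def findCloseGenes_alt (metagenebkt : List (String × Int × Int)) (left : Int) (right : Int) : List String :=
  let keys := metagenebkt.map (fun p => p.1)
  let lcand := keys.filter (fun g => decide ((pvLookup metagenebkt g).2 < left))
  let rcand := keys.filter (fun g => decide ((pvLookup metagenebkt g).1 > right))
  let leftg := match PySem.List.min? lcand (fun g => left - (pvLookup metagenebkt g).2) with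
    | some g => g
    | none => ""
  let rightg := match PySem.List.min? rcand (fun g => (pvLookup metagenebkt g).1 - right) with
    | some g => g
    | none => ""
  ["[" ++ leftg ++ "," ++ rightg ++ "]"]

-- ===== PRECONDITION & SPEC =====
def Spec_findCloseGenes (metagenebkt : List (String × Int × Int)) (left : Int) (right : Int) (out : List String) : Prop := out = findCloseGenes_alt metagenebkt left right
instance (metagenebkt : List (String × Int × Int)) (left : Int) (right : Int) (out : List String) : Decidable (Spec_findCloseGenes metagenebkt left right out) := by unfold Spec_findCloseGenes; infer_instance

-- ===== CLAIM (what is proved, stated in full; the proofs are below) =====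
def Claim_equal_findCloseGenes : Prop := ∀ (metagenebkt : List (String × Int × Int)) (left : Int) (right : Int), Dom_findCloseGenes metagenebkt left right → Spec_findCloseGenes metagenebkt left right (findCloseGenes metagenebkt left right)

-- ===== LEMMAS AND PROOFS =====

-- the value a running-minimum state corresponds to: none => the sentinel, some g => (its key, g)
def pvConv (key : String → Int) : Option String → Int × String
  | none => (10 ^ 10, "")
  | some g => (key g, g)

-- one step of A's one-sided running minimum
def pvStep (cond : String → Prop) [DecidablePred cond] (key : String → Int)
    (s : Int × String) (g : String) : Int × String :=
  if cond g ∧ key g < s.1 then (key g, g) else s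

-- one step of min?'s Option-valued argmin fold
def pvMinStep (key : String → Int) (acc : Option String) (x : String) : Option String :=
  match acc with
  | none => some x
  | some mm => if key x < key mm then some x else some mm

theorem pv_min?_eq (xs : List String) (key : String → Int) :
    PySem.List.min? xs key = xs.foldl (pvMinStep key) none := by
  simp only [PySem.List.min?]
  apply List.foldl_ext
  intro acc x hx
  cases acc <;> rfl

-- one-sided running-minimum loop = Option-valued argmin fold over the filtered candidates
theorem pv_fold_min (cond : String → Prop) [DecidablePred cond] (key : String → Int)
    (keys : List String) (o : Option String)
    (hall : ∀ g ∈ keys, cond g → key g < 10 ^ 10)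
    (ho : ∀ g, o = some g → key g < 10 ^ 10) :
    keys.foldl (pvStep cond key) (pvConv key o)
      = pvConv key ((keys.filter (fun g => decide (cond g))).foldl (pvMinStep key) o) := by
  induction keys generalizing o with
  | nil => rfl
  | cons g rest ih =>
    have hrest : ∀ g ∈ rest, cond g → key g < 10 ^ 10 := fun g' h' => hall g' (by simp [h'])
    by_cases hc : cond g
    · have hfc : List.filter (fun g => decide (cond g)) (g :: rest)
          = g :: List.filter (fun g => decide (cond g)) rest := by simp [hc]
      rw [hfc, List.foldl_cons, List.foldl_cons]
      cases o with
      | none =>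
        have hkg : key g < 10 ^ 10 := hall g (by simp) hc
        have h1 : pvStep cond key (pvConv key none) g = pvConv key (some g) := by
          unfold pvStep
          rw [if_pos (⟨hc, hkg⟩ : cond g ∧ key g < (pvConv key (none : Option String)).1)]
          rfl
        have h2 : pvMinStep key none g = some g := rfl
        rw [h1, h2]
        exact ih (some g) hrest (fun g' h' => by cases h'; exact hkg)
      | some mm =>
        by_cases hlt : key g < key mm
        · have h1 : pvStep cond key (pvConv key (some mm)) g = pvConv key (some g) := by
            unfold pvStep
            rw [if_pos (⟨hc, hlt⟩ : cond g ∧ key g < (pvConv key (some mm)).1)]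
            rfl
          have h2 : pvMinStep key (some mm) g = some g := by simp [pvMinStep, hlt]
          rw [h1, h2]
          exact ih (some g) hrest (fun g' h' => by cases h'; exact hall g (by simp) hc)
        · have h1 : pvStep cond key (pvConv key (some mm)) g = pvConv key (some mm) := by
            unfold pvStep
            rw [if_neg (fun h => hlt h.2)]
          have h2 : pvMinStep key (some mm) g = some mm := by simp [pvMinStep, hlt]
          rw [h1, h2]
          exact ih (some mm) hrest ho
    · have hfc : List.filter (fun g => decide (cond g)) (g :: rest)
          = List.filter (fun g => decide (cond g)) rest := by simp [hc]
      rw [hfc, List.foldl_cons]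
      have h1 : pvStep cond key (pvConv key o) g = pvConv key o := by
        unfold pvStep
        rw [if_neg (fun h => hc h.1)]
      rw [h1]
      exact ih o hrest ho

-- A's four-component loop splits into two independent two-component running minima
theorem pv_fold_split (valf : String → Int × Int) (left right : Int) (keys : List String)
    (a b : Int × String) :
    keys.foldl (fun s g =>
        let v := valf g
        let s1 := if v.2 < left ∧ left - v.2 < s.1 then (left - v.2, s.2.1, g, s.2.2.2) else s
        if v.1 > right ∧ v.1 - right < s1.2.1 then (s1.1, v.1 - right, s1.2.2.1, g) else s1)
      (a.1, b.1, a.2, b.2)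
      = ((keys.foldl (pvStep (fun g => (valf g).2 < left) (fun g => left - (valf g).2)) a).1,
         (keys.foldl (pvStep (fun g => (valf g).1 > right) (fun g => (valf g).1 - right)) b).1,
         (keys.foldl (pvStep (fun g => (valf g).2 < left) (fun g => left - (valf g).2)) a).2,
         (keys.foldl (pvStep (fun g => (valf g).1 > right) (fun g => (valf g).1 - right)) b).2) := by
  induction keys generalizing a b with
  | nil => rfl
  | cons g rest ih =>
    simp only [List.foldl_cons, pvStep]
    by_cases h1 : (valf g).2 < left ∧ left - (valf g).2 < a.1 <;>
      by_cases h2 : (valf g).1 > right ∧ (valf g).1 - right < b.1 <;>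
      simp only [h1, h2, if_true, if_false, and_true, and_false, if_pos, if_neg,
        not_false_iff] <;>
      first
        | exact ih (left - (valf g).2, g) ((valf g).1 - right, g)
        | exact ih (left - (valf g).2, g) b
        | exact ih a ((valf g).1 - right, g)
        | exact ih a b

-- every key of the dict looks up some entry's value
theorem pvLookup_mem (m : List (String × Int × Int)) (g : String)
    (h : g ∈ m.map (fun p => p.1)) : ∃ p ∈ m, pvLookup m g = p.2 := by
  obtain ⟨p, hp, hpg⟩ := List.mem_map.mp h
  have hsome : (m.find? (fun q => q.1 == g)).isSome := by
    rw [List.find?_isSome]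
    exact ⟨p, hp, by simp [hpg]⟩
  obtain ⟨q, hq⟩ := Option.isSome_iff_exists.mp hsome
  exact ⟨q, List.mem_of_find?_eq_some hq, by simp [pvLookup, hq]⟩

-- ===== VERDICT (by name: the statement is the Claim_ definition above) =====
theorem findCloseGenes_spec : Claim_equal_findCloseGenes := by
  intro m left right hDom
  show findCloseGenes m left right = findCloseGenes_alt m left right
  have hbound : ∀ p ∈ m, -2147483648 ≤ p.2.1 ∧ p.2.1 ≤ 2147483648 ∧
      -2147483648 ≤ p.2.2 ∧ p.2.2 ≤ 2147483648 := by
    intro p hp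
    simp only [Dom_findCloseGenes, Bool.and_eq_true, List.all_eq_true, pvDomInt,
      decide_eq_true_eq] at hDom
    obtain ⟨⟨hall, _⟩, _⟩ := hDom
    obtain ⟨_, h1, h2⟩ := hall p hp
    exact ⟨h1.1, h1.2, h2.1, h2.2⟩
  have hLR : (-2147483648 ≤ left ∧ left ≤ 2147483648) ∧
      (-2147483648 ≤ right ∧ right ≤ 2147483648) := by
    simp only [Dom_findCloseGenes, Bool.and_eq_true, pvDomInt, decide_eq_true_eq] at hDom
    exact ⟨hDom.1.2, hDom.2⟩
  have hallL : ∀ g ∈ m.map (fun p => p.1), (pvLookup m g).2 < left →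
      left - (pvLookup m g).2 < 10 ^ 10 := by
    intro g hg _
    obtain ⟨p, hp, hv⟩ := pvLookup_mem m g hg
    have := hbound p hp
    have := hLR
    rw [hv]; omega
  have hallR : ∀ g ∈ m.map (fun p => p.1), (pvLookup m g).1 > right →
      (pvLookup m g).1 - right < 10 ^ 10 := by
    intro g hg _
    obtain ⟨p, hp, hv⟩ := pvLookup_mem m g hg
    have := hbound p hp
    have := hLR
    rw [hv]; omega
  have hL := pv_fold_min (fun g => (pvLookup m g).2 < left)
    (fun g => left - (pvLookup m g).2) (m.map (fun p => p.1)) none hallL (by simp)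
  have hR := pv_fold_min (fun g => (pvLookup m g).1 > right)
    (fun g => (pvLookup m g).1 - right) (m.map (fun p => p.1)) none hallR (by simp)
  have hsplit := pv_fold_split (pvLookup m) left right (m.map (fun p => p.1))
    (pvConv (fun g => left - (pvLookup m g).2) none)
    (pvConv (fun g => (pvLookup m g).1 - right) none)
  rw [hL, hR] at hsplit
  have hA : findCloseGenes m left right
      = ["[" ++ ((m.map (fun p => p.1)).foldl (fun s g =>
          let v := pvLookup m g
          let s1 := if v.2 < left ∧ left - v.2 < s.1 then (left - v.2, s.2.1, g, s.2.2.2) else s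
          if v.1 > right ∧ v.1 - right < s1.2.1 then (s1.1, v.1 - right, s1.2.2.1, g) else s1)
          ((pvConv (fun g => left - (pvLookup m g).2) none).1,
           (pvConv (fun g => (pvLookup m g).1 - right) none).1,
           (pvConv (fun g => left - (pvLookup m g).2) none).2,
           (pvConv (fun g => (pvLookup m g).1 - right) none).2)).2.2.1
        ++ "," ++ ((m.map (fun p => p.1)).foldl (fun s g =>
          let v := pvLookup m g
          let s1 := if v.2 < left ∧ left - v.2 < s.1 then (left - v.2, s.2.1, g, s.2.2.2) else s
          if v.1 > right ∧ v.1 - right < s1.2.1 then (s1.1, v.1 - right, s1.2.2.1, g) else s1)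
          ((pvConv (fun g => left - (pvLookup m g).2) none).1,
           (pvConv (fun g => (pvLookup m g).1 - right) none).1,
           (pvConv (fun g => left - (pvLookup m g).2) none).2,
           (pvConv (fun g => (pvLookup m g).1 - right) none).2)).2.2.2 ++ "]"] := rfl
  have hB : findCloseGenes_alt m left right
      = ["[" ++ (match PySem.List.min? ((m.map (fun p => p.1)).filter
            (fun g => decide ((pvLookup m g).2 < left))) (fun g => left - (pvLookup m g).2) with
          | some g => g
          | none => "")
        ++ "," ++ (match PySem.List.min? ((m.map (fun p => p.1)).filter
            (fun g => decide ((pvLookup m g).1 > right))) (fun g => (pvLookup m g).1 - right) with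
          | some g => g
          | none => "") ++ "]"] := rfl
  rw [hA, hB, hsplit, pv_min?_eq, pv_min?_eq]
  cases (((m.map (fun p => p.1)).filter (fun g => decide ((pvLookup m g).2 < left))).foldl
      (pvMinStep (fun g => left - (pvLookup m g).2)) none) <;>
    cases (((m.map (fun p => p.1)).filter (fun g => decide ((pvLookup m g).1 > right))).foldl
      (pvMinStep (fun g => (pvLookup m g).1 - right)) none) <;>
    rfl
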